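-- pv_equiv track=rewrite | github.com/CheHyeonYeong/CodingTestStudy | 프로그래머스/0/120921. 문자열 밀기/문자열 밀기.py | solution
-- ===== SOURCE A (Python) =====
-- def solution(A, B):
--     answer = 0
--     if A==B:
--         return 0
--     #A에서 B가 되어야 함
--
--     for i in range(len(A)):
--         A=A[-1]+A[0:len(A)-1]
--         answer+=1
--         if A==B:
--             return answer
--
--     return -1
-- ===== SOURCE B (Python) =====
-- def solution(A, B):
--     if A == B:
--         return 0
--     if len(A) != len(B):
--         return -1
--     # smallest right-shift count i>=1 turning A into B is the smallest i with
--     # B shifted left by i equal to A, i.e. the first occurrence of A in B+B at index >= 1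
--     return (B + B).find(A, 1)
-- ===== Notes on version B (the rewrite author's own statement) =====
-- stated objective: faster
-- what changed: Replaces the rotate-one-step-and-compare loop (n rotations, each building and comparing an n-char string) by a single substring search of A in the doubled string B+B starting at index 1, mapping the first match index directly to the shift count.
import Mathlib
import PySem

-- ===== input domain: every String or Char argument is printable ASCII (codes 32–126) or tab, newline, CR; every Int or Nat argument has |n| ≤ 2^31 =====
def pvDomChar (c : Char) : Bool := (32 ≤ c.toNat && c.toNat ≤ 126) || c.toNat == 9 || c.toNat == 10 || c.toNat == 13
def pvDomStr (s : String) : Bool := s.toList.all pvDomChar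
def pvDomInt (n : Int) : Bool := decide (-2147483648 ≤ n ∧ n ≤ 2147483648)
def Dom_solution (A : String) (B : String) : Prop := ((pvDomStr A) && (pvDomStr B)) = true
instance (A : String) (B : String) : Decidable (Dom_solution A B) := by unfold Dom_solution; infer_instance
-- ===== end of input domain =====

-- B replaces A's rotate-and-compare loop by one substring search of A in B+B; equivalence of return values is proved (no mutation is observable: Python strings are immutable).

-- ===== PORT A =====
-- the for-loop of A: state = (current rotated string, answer); fuel = len(A) iterations.
-- 'A = A[-1] + A[0:len(A)-1]': A[-1] is pyGet? a (-1) (never none here: the loop body only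
-- runs when fuel = len(A) > 0 and rotation preserves length, so Option.toList is exact).
def pvLoopA (b : List Char) : List Char → Int → Nat → Int
  | _, _, 0 => -1
  | a, ans, fuel + 1 =>
      let a' := (PySem.List.pyGet? a (-1)).toList
                  ++ PySem.List.slice a (some 0) (some ((a.length : Int) - 1))
      if a' = b then ans + 1 else pvLoopA b a' (ans + 1) fuel

def solution (A : String) (B : String) : Int :=
  if A.toList = B.toList then 0
  else pvLoopA B.toList A.toList 0 A.toList.length

-- ===== PORT B =====
-- Source B: '(B + B).find(A, 1)' — string concatenation and find ported on the character lists (exact).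
def solution_alt (A : String) (B : String) : Int :=
  if A.toList = B.toList then 0
  else if A.toList.length ≠ B.toList.length then -1
  else PySem.Chars.findFrom (B.toList ++ B.toList) A.toList 1

-- ===== PRECONDITION & SPEC =====
def Spec_solution (A : String) (B : String) (out : Int) : Prop := out = solution_alt A B
instance (A : String) (B : String) (out : Int) : Decidable (Spec_solution A B out) := by unfold Spec_solution; infer_instance

-- ===== CLAIM (what is proved, stated in full; the proofs are below) =====
def Claim_equal_solution : Prop := ∀ (A : String) (B : String), Dom_solution A B → Spec_solution A B (solution A B)

-- ===== LEMMAS AND PROOFS =====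

-- the loop body is a right rotation, i.e. List.rotate by length - 1
lemma pvGetLast?_toList (a : List Char) : a.getLast?.toList = a.drop (a.length - 1) := by
  induction a with
  | nil => simp
  | cons x t ih =>
    cases t with
    | nil => simp
    | cons y s => simpa using ih

lemma pvBody_eq_rotate (a : List Char) (h : a ≠ []) :
    (PySem.List.pyGet? a (-1)).toList
      ++ PySem.List.slice a (some 0) (some ((a.length : Int) - 1))
      = a.rotate (a.length - 1) := by
  have h1 : 1 ≤ a.length := List.length_pos_iff.mpr h
  have hc : ((a.length : Int) - 1) = ((a.length - 1 : Nat) : Int) := by omega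
  rw [PySem.List.pyGet?_neg_one, hc, PySem.List.slice_zero_start,
      PySem.List.slice_to_natCast, pvGetLast?_toList,
      List.rotate_eq_drop_append_take (by omega)]

-- loop characterisation: pvLoopA returns ans + (first i < fuel with rrot^(i+1) a = b) + 1, else -1
lemma pvLoopA_find (b : List Char) (fuel : Nat) : ∀ (a : List Char) (ans : Int),
    a ≠ [] → a.length = b.length →
    pvLoopA b a ans fuel =
      match (List.range fuel).find? (fun i => decide (a.rotate ((i + 1) * (a.length - 1)) = b)) with
      | some i => ans + (i : Int) + 1
      | none => -1 := by
  induction fuel with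
  | zero => intro a ans _ _; simp [pvLoopA]
  | succ f ih =>
    intro a ans ha hlen
    have hn : 1 ≤ a.length := List.length_pos_iff.mpr ha
    rw [pvLoopA]
    simp only [pvBody_eq_rotate a ha]
    have hlen' : (a.rotate (a.length - 1)).length = a.length := List.length_rotate ..
    have ha' : a.rotate (a.length - 1) ≠ [] := by
      intro h; rw [h] at hlen'; simp at hlen'; omega
    rw [List.range_succ_eq_map, List.find?_cons, List.find?_map]
    by_cases h0 : a.rotate (a.length - 1) = b
    · have : a.rotate ((0 + 1) * (a.length - 1)) = b := by simpa using h0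
      simp [h0]
    · have h0' : ¬ a.rotate ((0 + 1) * (a.length - 1)) = b := by simpa using h0
      rw [if_neg h0]
      rw [ih (a.rotate (a.length - 1)) (ans + 1) ha' (by omega)]
      have hpred : ∀ i : Nat,
          (a.rotate (a.length - 1)).rotate ((i + 1) * ((a.rotate (a.length - 1)).length - 1))
            = a.rotate ((i + 1 + 1) * (a.length - 1)) := by
        intro i
        rw [hlen', List.rotate_rotate]
        ring_nf
      simp only [h0', decide_false, Function.comp_def, hpred]
      cases hfind : (List.range f).find? (fun i => decide (a.rotate ((i + 1 + 1) * (a.length - 1)) = b)) with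
      | none => simp
      | some i => simp; ring

-- rotation of a equals b iff a is a prefix of (b ++ b) dropped by the complementary shift
lemma pvRotate_iff_prefix (a b : List Char) (n j : Nat) (hA : a.length = n) (hB : b.length = n)
    (hj1 : 1 ≤ j) (hjn : j ≤ n) :
    a.rotate (n - j) = b ↔ a <+: (b ++ b).drop j := by
  have hiff : a.rotate (n - j) = b ↔ a = b.rotate j := by
    constructor
    · intro h
      have h2 : (a.rotate (n - j)).rotate j = b.rotate j := by rw [h]
      rw [List.rotate_rotate, Nat.sub_add_cancel hjn, ← hA, List.rotate_length] at h2
      exact h2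
    · intro h
      rw [h, List.rotate_rotate]
      have hjj : j + (n - j) = n := by omega
      rw [hjj, ← hB, List.rotate_length]
  rw [hiff]
  have hdrop : (b ++ b).drop j = b.drop j ++ b := List.drop_append_of_le_length (by omega)
  rw [hdrop, List.prefix_iff_eq_take, hA, List.take_append]
  have hlen : (b.drop j).length = n - j := by simp [hB]
  rw [List.take_of_length_le (by omega), hlen]
  have : n - (n - j) = j := by omega
  rw [this, ← List.rotate_eq_drop_append_take (by omega)]

-- infix of a drop is "prefix at some position ≥ the drop"
lemma pvInfix_drop_iff (a s : List Char) (k : Nat) :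
    a <:+: s.drop k ↔ ∃ i, a <+: s.drop (k + i) := by
  constructor
  · rintro ⟨pre, post, h⟩
    refine ⟨pre.length, ?_⟩
    have h1 : List.drop (k + pre.length) s = List.drop pre.length (List.drop k s) := by
      rw [List.drop_drop, Nat.add_comm]
    rw [h1, ← h, List.append_assoc, List.drop_left]
    exact List.prefix_append a post
  · rintro ⟨i, h⟩
    have : s.drop (k + i) = (s.drop k).drop i := by rw [List.drop_drop, Nat.add_comm]
    rw [this] at h
    exact h.isInfix.trans (List.drop_suffix i (s.drop k)).isInfix

-- find? over range picks the least witness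
lemma pvFind?_range_eq_some {p : Nat → Bool} {n i : Nat} (hi : i < n) (hp : p i = true)
    (hmin : ∀ j, j < i → p j = false) : (List.range n).find? p = some i := by
  induction n with
  | zero => omega
  | succ m ih =>
    rw [List.range_succ, List.find?_append]
    rcases Nat.lt_or_ge i m with h | h
    · rw [ih h, Option.some_or]
    · have him : i = m := by omega
      have : (List.range m).find? p = none := by
        rw [List.find?_eq_none]
        intro x hx
        simp only [List.mem_range] at hx
        simp [hmin x (by omega)]
      rw [this, Option.none_or]
      simp [← him, hp]

-- a match position is at most n (a prefix cannot be longer than what remains)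
lemma pvPrefix_le (a b : List Char) (n j : Nat) (hA : a.length = n) (hB : b.length = n)
    (hn : 1 ≤ n) (h : a <+: (b ++ b).drop j) : j ≤ n := by
  have h1 := h.length_le
  rw [List.length_drop, List.length_append, hA, hB] at h1
  omega

-- main bridge: on unequal strings of equal positive length the loop equals findFrom on b ++ b
lemma pvMain (a b : List Char) (n : Nat) (hA : a.length = n) (hB : b.length = n)
    (hab : a ≠ b) (hn : 1 ≤ n) :
    pvLoopA b a 0 n = PySem.Chars.findFrom (b ++ b) a 1 := by
  subst hA
  have ha : a ≠ [] := by intro h; rw [h] at hn; simp at hn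
  set n := a.length with hn'
  -- the per-position predicate
  have hiffP : ∀ i : Nat, i < n →
      (a.rotate ((i + 1) * (n - 1)) = b ↔ a <+: (b ++ b).drop (i + 1)) := by
    intro i hi
    obtain ⟨m, hm⟩ : ∃ m, n = i + 1 + m := ⟨n - (i + 1), by omega⟩
    have hmod : ((i + 1) * (n - 1)) % n = (n - (i + 1)) % n := by
      rw [hm]
      have e1 : (i + 1) * (i + 1 + m - 1) = m + i * (i + 1 + m) := by
        have h3 : i + 1 + m - 1 = i + m := by omega
        rw [h3]; ring
      have e2 : i + 1 + m - (i + 1) = m := by omega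
      rw [e1, e2, Nat.add_mul_mod_self_right, Nat.mod_eq_of_lt (by omega)]
    have hrot : a.rotate ((i + 1) * (n - 1)) = a.rotate (n - (i + 1)) := by
      rw [← List.rotate_mod, ← hn', hmod, List.rotate_mod]
    rcases Nat.lt_or_ge (i + 1) n with h | h
    · rw [hrot]
      exact pvRotate_iff_prefix a b n (i + 1) rfl hB (by omega) (by omega)
    · -- i + 1 = n : both sides are false
      have hin : i + 1 = n := by omega
      constructor
      · intro hcon
        rw [hrot, hin, Nat.sub_self, List.rotate_zero] at hcon
        exact absurd hcon hab
      · intro hcon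
        have hbb : (b ++ b).drop (i + 1) = b := by
          rw [hin, List.drop_append_of_le_length (by omega)]
          simp [hB]
        rw [hbb] at hcon
        exact absurd (List.IsPrefix.eq_of_length hcon (by omega)) hab
  rw [pvLoopA_find b n a 0 ha (by omega)]
  have h2n : (1 : Nat) ≤ (b ++ b).length := by simp [hB]; omega
  have hgoal : PySem.Chars.findFrom (b ++ b) a 1
      = PySem.Chars.findFrom (b ++ b) a ((1 : Nat) : Int) := by norm_num
  rw [hgoal]
  set E := PySem.Chars.findFrom (b ++ b) a ((1 : Nat) : Int) with hEdef
  by_cases hE : E = -1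
  · -- no match anywhere ⇒ the loop predicate is false on all of range n
    have hno := (PySem.Chars.findFrom_natCast_eq_neg_one_iff (b ++ b) a 1 h2n).mp hE
    rw [pvInfix_drop_iff] at hno
    push Not at hno
    have hnone : (List.range n).find? (fun i => decide (a.rotate ((i + 1) * (n - 1)) = b)) = none := by
      rw [List.find?_eq_none]
      intro i hi
      simp only [List.mem_range] at hi
      simp only [decide_eq_true_eq, hiffP i hi]
      intro hcon
      exact (hno i) (by rwa [Nat.add_comm] at hcon)
    rw [hnone, hE]
  · -- a match: findFrom is the least position j ≥ 1, the loop finds i = j - 1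
    obtain ⟨hge, hpre, hminp⟩ := PySem.Chars.findFrom_natCast_spec (b ++ b) a 1 h2n hE
    have hE0 : 0 ≤ E := le_trans (by omega) hge
    have hE1 : 1 ≤ E.toNat := by omega
    have hEn : E.toNat ≤ n := pvPrefix_le a b n E.toNat rfl hB hn hpre
    have hi : E.toNat - 1 < n := by omega
    have hfind : (List.range n).find? (fun i => decide (a.rotate ((i + 1) * (n - 1)) = b))
        = some (E.toNat - 1) := by
      apply pvFind?_range_eq_some hi
      · simp only [decide_eq_true_eq, hiffP (E.toNat - 1) hi]
        have h4 : E.toNat - 1 + 1 = E.toNat := by omega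
        rw [h4]; exact hpre
      · intro j hj
        simp only [decide_eq_false_iff_not, hiffP j (by omega)]
        intro hcon
        exact hminp (j + 1) (by omega) (by omega) hcon
    rw [hfind]
    show (0 : Int) + ((E.toNat - 1 : Nat) : Int) + 1 = E
    omega

-- the loop never matches when the lengths differ (rotation preserves length)
lemma pvLoopA_ne_length (b : List Char) (fuel : Nat) : ∀ (a : List Char) (ans : Int),
    a.length ≠ b.length → pvLoopA b a ans fuel = -1 := by
  induction fuel with
  | zero => intro a ans _; simp [pvLoopA]
  | succ f ih =>
    intro a ans hne
    rw [pvLoopA]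
    by_cases ha : a = []
    · subst ha
      have : (PySem.List.pyGet? ([] : List Char) (-1)).toList
          ++ PySem.List.slice ([] : List Char) (some 0) (some ((List.length ([] : List Char) : Int) - 1)) = [] := by
        simp [PySem.List.pyGet?_neg_one, PySem.List.slice_to_neg_one]
      simp only [this]
      rw [if_neg (by intro h; exact hne (by simp [← h]))]
      exact ih [] (ans + 1) (by simpa using hne)
    · rw [pvBody_eq_rotate a ha]
      have hlen : (a.rotate (a.length - 1)).length = a.length := List.length_rotate ..
      rw [if_neg (by intro h; exact hne (by rw [← h, hlen]))]
      exact ih _ (ans + 1) (by rw [hlen]; exact hne)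

-- ===== VERDICT (by name: the statement is the Claim_ definition above) =====
theorem solution_spec : Claim_equal_solution := by
  intro A B _
  unfold Spec_solution solution solution_alt
  by_cases heq : A.toList = B.toList
  · simp [heq]
  · rw [if_neg heq, if_neg heq]
    by_cases hlen : A.toList.length ≠ B.toList.length
    · rw [if_pos hlen]
      exact pvLoopA_ne_length B.toList A.toList.length A.toList 0 hlen
    · rw [if_neg hlen]
      push Not at hlen
      have hn : 1 ≤ A.toList.length := by
        rcases Nat.eq_zero_or_pos A.toList.length with h | h
        · exfalso
          apply heq
          rw [List.length_eq_zero_iff.mp h, List.length_eq_zero_iff.mp (hlen.symm.trans h)]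
        · omega
      exact pvMain A.toList B.toList A.toList.length rfl hlen.symm heq hn
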